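-- pv_equiv track=rewrite | github.com/dhiaselmi1/documind-ai | backend/agents/red_flag_agent.py | _categorize_severity
-- ===== SOURCE A (Python) =====
-- from typing import Dict, Any, List
--
-- def _categorize_severity(red_flags: List[str]) -> Dict[str, int]:
--     """Categorize red flags by severity."""
--     high_keywords = ["lawsuit", "breach", "violation", "fraud", "bankruptcy", "critical", "emergency"]
--     medium_keywords = ["risk", "issue", "concern", "deadline", "dispute"]
--
--     severity = {"high": 0, "medium": 0, "low": 0}
--
--     for flag in red_flags:
--         flag_lower = flag.lower()
--         if any(keyword in flag_lower for keyword in high_keywords):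
--             severity["high"] += 1
--         elif any(keyword in flag_lower for keyword in medium_keywords):
--             severity["medium"] += 1
--         else:
--             severity["low"] += 1
--
--     return severity
-- ===== SOURCE B (Python) =====
-- def _categorize_severity(red_flags):
--     """Categorize red flags by severity (multi-pass counting, low by subtraction)."""
--     high_keywords = ["lawsuit", "breach", "violation", "fraud", "bankruptcy", "critical", "emergency"]
--     medium_keywords = ["risk", "issue", "concern", "deadline", "dispute"]
--
--     lows = [flag.lower() for flag in red_flags]
--     high = sum(1 for f in lows if any(k in f for k in high_keywords))
--     medium = sum(1 for f in lows
--                  if any(k in f for k in medium_keywords)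
--                  and not any(k in f for k in high_keywords))
--     return {"high": high, "medium": medium, "low": len(red_flags) - high - medium}
-- ===== Notes on version B (the rewrite author's own statement) =====
-- stated objective: alternative
-- what changed: Replaces A's single branching loop over a mutable dict with per-bucket counting passes: high and medium are counted by separate comprehensions over once-lowercased flags and low is derived by subtraction, no dict mutation.
import Mathlib
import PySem

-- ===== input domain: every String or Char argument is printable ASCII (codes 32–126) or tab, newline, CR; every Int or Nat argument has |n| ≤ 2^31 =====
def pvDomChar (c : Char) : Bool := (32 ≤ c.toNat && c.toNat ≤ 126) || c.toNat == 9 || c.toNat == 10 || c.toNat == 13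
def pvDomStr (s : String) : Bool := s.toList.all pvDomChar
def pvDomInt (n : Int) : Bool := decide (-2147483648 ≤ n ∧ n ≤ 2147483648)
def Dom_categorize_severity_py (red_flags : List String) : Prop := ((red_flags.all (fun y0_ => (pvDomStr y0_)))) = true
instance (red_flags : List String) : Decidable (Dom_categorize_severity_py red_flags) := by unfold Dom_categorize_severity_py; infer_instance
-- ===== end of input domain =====

-- B counts each severity bucket in its own pass and derives "low" by subtraction; A keeps one branching loop over a dict. Same cost, different decomposition.

-- shared keyword constants (module-level data of both programs)
def pvHighKws : List String := ["lawsuit", "breach", "violation", "fraud", "bankruptcy", "critical", "emergency"]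
def pvMedKws : List String := ["risk", "issue", "concern", "deadline", "dispute"]

-- ===== PORT A =====
def categorize_severity_py (red_flags : List String) : List (String × Int) :=
  let severity : PySem.Dict String Int := PySem.Dict.ofList [("high", 0), ("medium", 0), ("low", 0)]
  let final := red_flags.foldl (fun d flag =>
    let flag_lower := PySem.Str.lower flag
    if pvHighKws.any (fun k => PySem.Str.isIn k flag_lower) then
      d.modify "high" 0 (· + 1)
    else if pvMedKws.any (fun k => PySem.Str.isIn k flag_lower) then
      d.modify "medium" 0 (· + 1)
    else
      d.modify "low" 0 (· + 1)) severity
  final.items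

-- ===== PORT B =====
def categorize_severity_py_alt (red_flags : List String) : List (String × Int) :=
  let lows := red_flags.map PySem.Str.lower
  let high : Int := lows.countP (fun f => pvHighKws.any (fun k => PySem.Str.isIn k f))
  let medium : Int := lows.countP (fun f =>
    pvMedKws.any (fun k => PySem.Str.isIn k f) && !(pvHighKws.any (fun k => PySem.Str.isIn k f)))
  [("high", high), ("medium", medium), ("low", (red_flags.length : Int) - high - medium)]

-- ===== PRECONDITION & SPEC =====
def Spec_categorize_severity_py (red_flags : List String) (out : List (String × Int)) : Prop := out = categorize_severity_py_alt red_flags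
instance (red_flags : List String) (out : List (String × Int)) : Decidable (Spec_categorize_severity_py red_flags out) := by unfold Spec_categorize_severity_py; infer_instance

-- ===== CLAIM (what is proved, stated in full; the proofs are below) =====
def Claim_equal_categorize_severity_py : Prop := ∀ (red_flags : List String), Dom_categorize_severity_py red_flags → Spec_categorize_severity_py red_flags (categorize_severity_py red_flags)

-- ===== LEMMAS AND PROOFS =====

def pvMk (a b c : Int) : PySem.Dict String Int :=
  PySem.Dict.ofList [("high", a), ("medium", b), ("low", c)]

lemma pvMod_high (a b c : Int) : (pvMk a b c).modify "high" 0 (· + 1) = pvMk (a + 1) b c := rfl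
lemma pvMod_med (a b c : Int) : (pvMk a b c).modify "medium" 0 (· + 1) = pvMk a (b + 1) c := rfl
lemma pvMod_low (a b c : Int) : (pvMk a b c).modify "low" 0 (· + 1) = pvMk a b (c + 1) := rfl

lemma pvFold (l : List String) : ∀ (a b c : Int),
    (l.foldl (fun d flag =>
      let flag_lower := PySem.Str.lower flag
      if pvHighKws.any (fun k => PySem.Str.isIn k flag_lower) then
        d.modify "high" 0 (· + 1)
      else if pvMedKws.any (fun k => PySem.Str.isIn k flag_lower) then
        d.modify "medium" 0 (· + 1)
      else
        d.modify "low" 0 (· + 1)) (pvMk a b c)).items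
    = [("high", a + l.countP (fun f => pvHighKws.any (fun k => PySem.Str.isIn k (PySem.Str.lower f)))),
       ("medium", b + l.countP (fun f => pvMedKws.any (fun k => PySem.Str.isIn k (PySem.Str.lower f))
                    && !(pvHighKws.any (fun k => PySem.Str.isIn k (PySem.Str.lower f))))),
       ("low", c + l.countP (fun f => !(pvHighKws.any (fun k => PySem.Str.isIn k (PySem.Str.lower f)))
                    && !(pvMedKws.any (fun k => PySem.Str.isIn k (PySem.Str.lower f)))))] := by
  induction l with
  | nil =>
    intro a b c
    simp only [List.foldl_nil, List.countP_nil, Nat.cast_zero, add_zero]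
    rfl
  | cons x l ih =>
    intro a b c
    simp only [List.foldl_cons, List.countP_cons]
    cases hx : (pvHighKws.any fun k => PySem.Str.isIn k (PySem.Str.lower x)) <;>
      cases mx : (pvMedKws.any fun k => PySem.Str.isIn k (PySem.Str.lower x)) <;>
      simp only [hx, mx, Bool.not_true, Bool.not_false, Bool.and_true, Bool.and_false,
        Bool.false_eq_true, if_true, if_false]
    · rw [pvMod_low, ih]
      simp only [List.cons.injEq, Prod.mk.injEq]
      and_intros <;> first | rfl | trivial | omega
    · rw [pvMod_med, ih]
      simp only [List.cons.injEq, Prod.mk.injEq]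
      and_intros <;> first | rfl | trivial | omega
    · rw [pvMod_high, ih]
      simp only [List.cons.injEq, Prod.mk.injEq]
      and_intros <;> first | rfl | trivial | omega
    · rw [pvMod_high, ih]
      simp only [List.cons.injEq, Prod.mk.injEq]
      and_intros <;> first | rfl | trivial | omega

lemma pvPartition (l : List String) :
    l.countP (fun f => pvHighKws.any (fun k => PySem.Str.isIn k (PySem.Str.lower f)))
      + l.countP (fun f => pvMedKws.any (fun k => PySem.Str.isIn k (PySem.Str.lower f))
          && !(pvHighKws.any (fun k => PySem.Str.isIn k (PySem.Str.lower f))))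
      + l.countP (fun f => !(pvHighKws.any (fun k => PySem.Str.isIn k (PySem.Str.lower f)))
          && !(pvMedKws.any (fun k => PySem.Str.isIn k (PySem.Str.lower f)))) = l.length := by
  induction l with
  | nil => rfl
  | cons x l ih =>
    simp only [List.countP_cons, List.length_cons]
    cases hx : (pvHighKws.any fun k => PySem.Str.isIn k (PySem.Str.lower x)) <;>
      cases mx : (pvMedKws.any fun k => PySem.Str.isIn k (PySem.Str.lower x)) <;>
      simp only [hx, mx, Bool.not_true, Bool.not_false, Bool.and_true, Bool.and_false,
        Bool.true_and, Bool.false_and, Bool.false_eq_true, eq_self_iff_true,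
        if_true, if_false, ite_true, ite_false] <;> omega

-- ===== VERDICT (by name: the statement is the Claim_ definition above) =====
theorem categorize_severity_py_spec : Claim_equal_categorize_severity_py := by
  intro red_flags _
  unfold Spec_categorize_severity_py categorize_severity_py categorize_severity_py_alt
  rw [show PySem.Dict.ofList [("high", (0:Int)), ("medium", 0), ("low", 0)] = pvMk 0 0 0 from rfl,
    pvFold]
  have hp := pvPartition red_flags
  simp only [List.countP_map, Function.comp_def, List.cons.injEq, Prod.mk.injEq]
  and_intros <;> first | rfl | trivial | omega
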